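-- pv_equiv track=rewrite | github.com/mattdepillis/python-dsa | ae_questions/strings/medium/min_characters_for_words/solution.py | min_characters_for_words
-- ===== SOURCE A (Python) =====
-- def min_characters_for_words(words):
--   chars, l = {}, []
--   for word in words:
--     multiple = {}
--     for letter in word:
--       if letter not in chars:
--         chars[letter] = multiple[letter] = 1
--       else:
--         if letter not in multiple: multiple[letter] = 1
--         else: multiple[letter] += 1
--     for key in multiple:
--       if multiple[key] > chars[key]: chars[key] = multiple[key]
--
--   for letter in chars:
--     for _ in range(chars[letter]):
--       l.append(letter)
--
--   return l
-- ===== SOURCE B (Python) =====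
-- def min_characters_for_words(words):
--   # distinct letters in first-appearance order, then each letter repeated
--   # by its maximum per-word multiplicity
--   letters = dict.fromkeys(c for w in words for c in w)
--   return [c for c in letters for _ in range(max(w.count(c) for w in words))]
-- ===== Notes on version B (the rewrite author's own statement) =====
-- stated objective: simpler
-- what changed: Replaces A's running-max dict maintained via a per-word temp count dict, an in-loop insertion branch and an explicit merge loop by two comprehensions: dedup the concatenated words for first-appearance letter order, then emit each letter max(w.count(c) for w in words) times.
import Mathlib
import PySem

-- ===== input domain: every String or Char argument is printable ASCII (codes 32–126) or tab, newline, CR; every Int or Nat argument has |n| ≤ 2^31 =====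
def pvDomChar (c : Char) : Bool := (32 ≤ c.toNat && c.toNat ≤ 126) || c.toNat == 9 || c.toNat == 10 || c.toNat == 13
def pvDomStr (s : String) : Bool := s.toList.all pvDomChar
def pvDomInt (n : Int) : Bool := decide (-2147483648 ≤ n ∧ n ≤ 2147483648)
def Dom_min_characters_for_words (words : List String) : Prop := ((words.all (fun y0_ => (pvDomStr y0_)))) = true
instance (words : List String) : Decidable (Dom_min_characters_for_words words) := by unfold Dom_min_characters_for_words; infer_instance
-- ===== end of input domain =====

-- B recomputes each letter's maximum per-word multiplicity directly instead of
-- maintaining A's running-max dict with a per-word temp dict and merge loop;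
-- objective: simpler (two short comprehensions), not claimed faster.

-- ===== PORT A =====
-- the body of A's inner letter loop, acting on the pair (chars, multiple)
def pvA_step (p : PySem.Dict Char Int × PySem.Dict Char Int) (letter : Char) :
    PySem.Dict Char Int × PySem.Dict Char Int :=
  if ¬ p.1.contains letter then (p.1.insert letter 1, p.2.insert letter 1)
  else if ¬ p.2.contains letter then (p.1, p.2.insert letter 1)
  else (p.1, p.2.modify letter 0 (· + 1))  -- multiple[letter] += 1

-- one iteration of A's outer word loop: letter loop, then the merge loop over multiple's keys
def pvA_word (chars : PySem.Dict Char Int) (word : String) : PySem.Dict Char Int :=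
  let p := word.toList.foldl pvA_step (chars, PySem.Dict.empty)
  p.2.keys.foldl
    (fun ch key => if p.2.getD key 0 > ch.getD key 0 then ch.insert key (p.2.getD key 0) else ch)
    p.1

def min_characters_for_words (words : List String) : List String :=
  let chars := words.foldl pvA_word PySem.Dict.empty
  -- for letter in chars: for _ in range(chars[letter]): l.append(letter)
  chars.items.foldl
    (fun l kv => (PySem.List.pyRange 0 kv.2 1).foldl (fun l _ => l ++ [String.ofList [kv.1]]) l)
    []

-- ===== PORT B =====
-- max(w.count(c) for w in words): the generator is nonempty and its values are the
-- (nonnegative) char counts wherever B evaluates it (c occurs in some word), so the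
-- fold from 0 is exact; w.count(c) for the 1-char string c is the character count.
def pvB_maxCount (words : List String) (c : Char) : Int :=
  (words.map (fun w => (w.toList.count c : Int))).foldl max 0

def min_characters_for_words_alt (words : List String) : List String :=
  -- letters = dict.fromkeys(c for w in words for c in w)
  let letters := PySem.List.dedup (words.flatMap (fun w => w.toList))
  letters.flatMap (fun c =>
    (PySem.List.pyRange 0 (pvB_maxCount words c) 1).map (fun _ => String.ofList [c]))

-- ===== PRECONDITION & SPEC =====
def Spec_min_characters_for_words (words : List String) (out : List String) : Prop := out = min_characters_for_words_alt words
instance (words : List String) (out : List String) : Decidable (Spec_min_characters_for_words words out) := by unfold Spec_min_characters_for_words; infer_instance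

-- ===== CLAIM (what is proved, stated in full; the proofs are below) =====
def Claim_equal_min_characters_for_words : Prop := ∀ (words : List String), Dom_min_characters_for_words words → Spec_min_characters_for_words words (min_characters_for_words words)

-- ===== LEMMAS AND PROOFS =====

theorem pv_modify_not_contains (d : PySem.Dict Char Int) (k : Char) (f : Int → Int)
    (h : d.contains k = false) : d.modify k 0 f = d.insert k (f 0) := by
  show d.insert k (f (d.getD k 0)) = _
  rw [PySem.Dict.getD_of_not_contains (d := d) 0 h]

theorem pv_inner (l : List Char) (d m : PySem.Dict Char Int)
    (hsub : ∀ c, m.contains c = true → d.contains c = true) :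
    l.foldl pvA_step (d, m) =
      (l.foldl (fun d c => d.setdefault c 1) d,
       l.foldl (fun m c => m.modify c 0 (· + 1)) m) := by
  induction l generalizing d m with
  | nil => rfl
  | cons x l ih =>
    simp only [List.foldl_cons]
    by_cases hd : d.contains x = true
    · have hsd : d.setdefault x 1 = d := PySem.Dict.setdefault_of_contains _ _ hd
      by_cases hm : m.contains x = true
      · have : pvA_step (d, m) x = (d, m.modify x 0 (· + 1)) := by
          simp [pvA_step, hd, hm]
        rw [this, hsd]
        exact ih d _ (fun c hc => by
          rcases Bool.or_eq_true_iff.mp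
            ((PySem.Dict.contains_modify m x c 0 (· + 1)) ▸ hc) with h | h
          · exact (beq_iff_eq.mp h) ▸ hd
          · exact hsub c h)
      · have hm' : m.contains x = false := by simpa using hm
        have : pvA_step (d, m) x = (d, m.insert x 1) := by
          simp [pvA_step, hd, hm']
        rw [this, hsd, pv_modify_not_contains m x _ hm']
        exact ih d _ (fun c hc => by
          rcases Bool.or_eq_true_iff.mp ((PySem.Dict.contains_insert m x c 1) ▸ hc) with h | h
          · exact (beq_iff_eq.mp h) ▸ hd
          · exact hsub c h)
    · have hd' : d.contains x = false := by simpa using hd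
      have hm' : m.contains x = false :=
        Bool.eq_false_iff.mpr (fun h => by rw [hsub x h] at hd'; exact absurd hd' (by simp))
      have : pvA_step (d, m) x = (d.insert x 1, m.insert x 1) := by
        simp [pvA_step, hd']
      rw [this, PySem.Dict.setdefault_of_not_contains _ _ hd',
        pv_modify_not_contains m x _ hm']
      exact ih _ _ (fun c hc => by
        rw [PySem.Dict.contains_insert m x c 1] at hc
        rw [PySem.Dict.contains_insert d x c 1]
        rcases Bool.or_eq_true_iff.mp hc with h | h
        · simp [h]
        · simp [hsub c h])

theorem pv_sd_keys (l : List Char) (d : PySem.Dict Char Int) :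
    (l.foldl (fun d c => d.setdefault c 1) d).keys = PySem.Set.update d.keys l := by
  induction l generalizing d with
  | nil => simp [PySem.Set.update_nil]
  | cons x l ih =>
    simp only [List.foldl_cons, PySem.Set.update_cons, ih]
    congr 1
    rw [PySem.Dict.keys_setdefault, PySem.Set.add_eq_ite]
    by_cases h : d.contains x = true
    · simp [h, (PySem.Dict.contains_iff_mem_keys d x).mp h]
    · have h' : d.contains x = false := by simpa using h
      have : x ∉ d.keys := fun hm => by
        rw [(PySem.Dict.contains_iff_mem_keys d x).mpr hm] at h'; simp at h'
      simp [h', this]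

theorem pv_sd_getD (l : List Char) (d : PySem.Dict Char Int) (c : Char) :
    (l.foldl (fun d c => d.setdefault c 1) d).getD c 0 =
      if d.contains c = false ∧ c ∈ l then 1 else d.getD c 0 := by
  induction l generalizing d with
  | nil => simp
  | cons x l ih =>
    simp only [List.foldl_cons, ih]
    by_cases hc : c = x
    · subst hc
      have h1 : (d.setdefault c 1).contains c = true := by
        rw [PySem.Dict.contains_setdefault]; simp
      by_cases h : d.contains c = true
      · rw [PySem.Dict.setdefault_of_contains _ _ h]
        simp [h]
      · have h' : d.contains c = false := by simpa using h
        rw [if_neg (by simp [h1]), if_pos ⟨h', List.mem_cons_self⟩]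
        rw [PySem.Dict.setdefault_of_not_contains _ _ h', PySem.Dict.getD_insert]
        simp
    · have h2 : (d.setdefault x 1).contains c = d.contains c := by
        rw [PySem.Dict.contains_setdefault]; simp [hc]
    -- getD through setdefault at a different key
      have h3 : (d.setdefault x 1).getD c 0 = d.getD c 0 := by
        rw [PySem.Dict.getD_eq_get?_getD, PySem.Dict.get?_setdefault_of_ne _ _ hc,
          ← PySem.Dict.getD_eq_get?_getD]
      rw [h2, h3]
      simp [hc]

theorem pv_merge_keys (ks : List Char) (f : Char → Int) (d : PySem.Dict Char Int)
    (h : ∀ k ∈ ks, d.contains k = true) :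
    (ks.foldl (fun ch k => if f k > ch.getD k 0 then ch.insert k (f k) else ch) d).keys = d.keys := by
  induction ks generalizing d with
  | nil => rfl
  | cons x ks ih =>
    simp only [List.foldl_cons]
    by_cases hgt : f x > d.getD x 0
    · rw [if_pos hgt]
      have hk := PySem.Dict.keys_insert_of_contains d (f x) (h x List.mem_cons_self)
      rw [ih _ (fun k hk' => by
        rw [PySem.Dict.contains_insert]
        simp [h k (List.mem_cons_of_mem _ hk')]), hk]
    · rw [if_neg hgt]
      exact ih _ (fun k hk' => h k (List.mem_cons_of_mem _ hk'))

theorem pv_merge_getD (ks : List Char) (f : Char → Int) (d : PySem.Dict Char Int) (c : Char)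
    (hnd : ks.Nodup) :
    (ks.foldl (fun ch k => if f k > ch.getD k 0 then ch.insert k (f k) else ch) d).getD c 0 =
      if c ∈ ks then max (d.getD c 0) (f c) else d.getD c 0 := by
  induction ks generalizing d with
  | nil => simp
  | cons x ks ih =>
    have hx : x ∉ ks := (List.nodup_cons.mp hnd).1
    have hnd' : ks.Nodup := (List.nodup_cons.mp hnd).2
    simp only [List.foldl_cons]
    have step : ∀ k', (if f x > d.getD x 0 then d.insert x (f x) else d).getD k' 0 =
        if k' = x then max (d.getD x 0) (f x) else d.getD k' 0 := by
      intro k'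
      by_cases hgt : f x > d.getD x 0
      · rw [if_pos hgt, PySem.Dict.getD_insert]
        by_cases hk : k' = x
        · simp [hk, le_of_lt hgt]
        · simp [hk]
      · rw [if_neg hgt]
        by_cases hk : k' = x
        · subst hk; simp [max_eq_left (le_of_not_gt hgt)]
        · simp [hk]
    rw [ih _ hnd']
    by_cases hc : c ∈ ks
    · have hcx : c ≠ x := fun h => hx (h ▸ hc)
      simp [hc, step c, hcx]
    · by_cases hcx : c = x
      · subst hcx; simp [hc, step c]
      · simp [hc, hcx, step c]

-- one outer-loop iteration of A, in closed form
theorem pv_perword (w : String) (S : List Char) (v : Char → Int) (d : PySem.Dict Char Int)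
    (hS : S.Nodup) (hv0 : ∀ c, c ∉ S → v c = 0) (hvpos : ∀ c, 0 ≤ v c)
    (hd : d.items = S.map (fun c => (c, v c))) :
    (pvA_word d w).items =
      (PySem.Set.update S w.toList).map (fun c => (c, max (v c) (w.toList.count c))) := by
  have hkeys : d.keys = S := by
    simp [PySem.Dict.keys, hd, List.map_map, Function.comp_def]
  have hcontains : ∀ c, d.contains c = true ↔ c ∈ S := by
    intro c; rw [PySem.Dict.contains_iff_mem_keys, hkeys]
  have hgetD : ∀ c, d.getD c 0 = v c := by
    intro c
    by_cases hc : c ∈ S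
    · exact PySem.Dict.getD_of_mem_items d
        (by rw [hd]; exact List.mem_map_of_mem hc) (by rw [hkeys]; exact hS) 0
    · rw [PySem.Dict.getD_of_not_contains d 0
        (by rw [Bool.eq_false_iff]; exact fun h => hc ((hcontains c).mp h)), hv0 c hc]
  unfold pvA_word
  rw [pv_inner w.toList d PySem.Dict.empty
    (fun c hc => by rw [PySem.Dict.contains_empty] at hc; exact absurd hc (by simp)),
    ← PySem.Dict.counter_eq_foldl]
  simp only [PySem.Dict.keys_counter, PySem.Dict.getD_counter]
  set sd := w.toList.foldl (fun d c => d.setdefault c 1) d with hsd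
  have hsdkeys : sd.keys = PySem.Set.update S w.toList := by
    rw [hsd, pv_sd_keys, hkeys]
  have hsdnodup : sd.keys.Nodup := by rw [hsdkeys]; exact PySem.Set.nodup_update S w.toList hS
  have hmem : ∀ k ∈ PySem.Set.ofList w.toList, sd.contains k = true := by
    intro k hk
    rw [PySem.Dict.contains_iff_mem_keys, hsdkeys, PySem.Set.mem_update]
    exact Or.inr ((PySem.Set.mem_ofList w.toList k).mp hk)
  have hmergekeys := pv_merge_keys (PySem.Set.ofList w.toList)
    (fun k => (w.toList.count k : Int)) sd hmem
  rw [PySem.Dict.items_eq_map_keys _ (by rw [hmergekeys]; exact hsdnodup) 0, hmergekeys, hsdkeys]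
  apply List.map_congr_left
  intro c hc
  refine congrArg (fun t => (c, t)) ?_
  rw [pv_merge_getD _ _ _ _ (PySem.Set.nodup_ofList w.toList)]
  have hsdgetD := pv_sd_getD w.toList d c
  rw [← hsd] at hsdgetD
  by_cases hcl : c ∈ w.toList
  · rw [if_pos ((PySem.Set.mem_ofList w.toList c).mpr hcl)]
    by_cases hcS : c ∈ S
    · rw [hsdgetD, if_neg (by simp [(hcontains c).mpr hcS]), hgetD]
    · have hcnt : 1 ≤ (w.toList.count c : Int) := by
        exact_mod_cast List.one_le_count_iff.mpr hcl
      rw [hsdgetD, if_pos ⟨by rw [Bool.eq_false_iff]; exact fun h => hcS ((hcontains c).mp h), hcl⟩,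
        hv0 c hcS]
      omega
  · rw [if_neg (fun h => hcl ((PySem.Set.mem_ofList w.toList c).mp h)), hsdgetD,
      if_neg (fun h => hcl h.2), hgetD]
    have : w.toList.count c = 0 := List.count_eq_zero.mpr hcl
    rw [this]
    exact (max_eq_left (by exact_mod_cast hvpos c)).symm

theorem pv_foldl_max (l : List Int) (a b : Int) :
    l.foldl max (max a b) = max a (l.foldl max b) := by
  induction l generalizing b with
  | nil => rfl
  | cons x l ih => simp only [List.foldl_cons, max_assoc, ih]

theorem pv_maxCount_cons (w : String) (ws : List String) (c : Char) :
    pvB_maxCount (w :: ws) c = max (w.toList.count c : Int) (pvB_maxCount ws c) := by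
  show (ws.map _).foldl max (max 0 _) = _
  rw [max_comm (0 : Int) _, pv_foldl_max]
  rfl

theorem pv_maxCount_nonneg (ws : List String) (c : Char) : 0 ≤ pvB_maxCount ws c := by
  exact (PySem.List.le_foldl_max (ws.map (fun w => (w.toList.count c : Int))) 0).1

-- A's whole word loop, in closed form
theorem pv_main (ws : List String) (S : List Char) (v : Char → Int) (d : PySem.Dict Char Int)
    (hS : S.Nodup) (hv0 : ∀ c, c ∉ S → v c = 0) (hvpos : ∀ c, 0 ≤ v c)
    (hd : d.items = S.map (fun c => (c, v c))) :
    (ws.foldl pvA_word d).items =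
      (PySem.Set.update S (ws.flatMap (fun w => w.toList))).map
        (fun c => (c, max (v c) (pvB_maxCount ws c))) := by
  induction ws generalizing S v d with
  | nil =>
    simp only [List.foldl_nil, List.flatMap_nil, PySem.Set.update_nil, hd]
    apply List.map_congr_left
    intro c _
    refine congrArg (fun t => (c, t)) ?_
    show v c = max (v c) 0
    exact (max_eq_left (hvpos c)).symm
  | cons w ws ih =>
    simp only [List.foldl_cons, List.flatMap_cons]
    rw [PySem.Set.update_append]
    rw [ih (PySem.Set.update S w.toList) (fun c => max (v c) (w.toList.count c)) (pvA_word d w)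
      (PySem.Set.nodup_update S w.toList hS)
      (fun c hc => by
        rw [PySem.Set.mem_update] at hc
        push Not at hc
        show max (v c) _ = 0
        rw [hv0 c hc.1, List.count_eq_zero.mpr hc.2]
        simp)
      (fun c => le_max_of_le_left (hvpos c))
      (pv_perword w S v d hS hv0 hvpos hd)]
    apply List.map_congr_left
    intro c _
    refine congrArg (fun t => (c, t)) ?_
    rw [pv_maxCount_cons, max_assoc]

-- ===== VERDICT (by name: the statement is the Claim_ definition above) =====
theorem min_characters_for_words_spec : Claim_equal_min_characters_for_words := by
  intro words _
  show min_characters_for_words words = min_characters_for_words_alt words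
  unfold min_characters_for_words min_characters_for_words_alt
  have hm := pv_main words [] (fun _ => 0) PySem.Dict.empty
    List.nodup_nil (fun _ _ => rfl) (fun _ => le_refl 0) rfl
  rw [PySem.Set.update_nil_left] at hm
  have hm' : (words.foldl pvA_word PySem.Dict.empty).items =
      (PySem.Set.ofList (words.flatMap (fun w => w.toList))).map
        (fun c => (c, pvB_maxCount words c)) := by
    rw [hm]
    apply List.map_congr_left
    intro c _
    refine congrArg (fun t => (c, t)) ?_
    exact max_eq_right (pv_maxCount_nonneg words c)
  simp only []
  rw [hm', PySem.List.dedup_eq_ofList]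
  simp only [PySem.List.foldl_append_eq_flatMap]
  simp only [List.nil_append, List.flatMap_map]
  congr 1
  funext c
  induction PySem.List.pyRange 0 (pvB_maxCount words c) with
  | nil => rfl
  | cons x r ih => simp [ih]
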